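-- pv_equiv track=rewrite | github.com/gabesnow99/WizardChessCode | Final Code/final_BETA/python_prototype.py | _find_first_char_and_int
-- ===== SOURCE A (Python) =====
-- def _find_first_char_and_int(square: str):
--     first_char = None
--     first_int = None
--     for char in square:
--         if char.isalpha():
--             if not first_char:
--                 first_char = char
--         elif char.isdigit():
--             if not first_int:
--                 first_int = char
--         if first_char and first_int:
--             break
--     if not first_char and not first_int:
--         raise ValueError('no col or row was identified')
--     if not first_char:
--         raise ValueError('no col was identified')
--     if not first_int:
--         raise ValueError('no row was identified')
--     return first_char.upper() + first_int
-- ===== SOURCE B (Python) =====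
-- def _find_first_char_and_int(square: str):
--     first_char = next((c for c in square if c.isalpha()), None)
--     first_int = next((c for c in square if c.isdigit()), None)
--     if first_char is None and first_int is None:
--         raise ValueError('no col or row was identified')
--     if first_char is None:
--         raise ValueError('no col was identified')
--     if first_int is None:
--         raise ValueError('no row was identified')
--     return first_char.upper() + first_int
-- ===== Notes on version B (the rewrite author's own statement) =====
-- stated objective: idiomatic
-- what changed: Replaces A's single fused early-exit loop maintaining two mutable slots with two independent first-match scans (next over a generator per predicate), keeping the same error ladder.
import Mathlib
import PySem

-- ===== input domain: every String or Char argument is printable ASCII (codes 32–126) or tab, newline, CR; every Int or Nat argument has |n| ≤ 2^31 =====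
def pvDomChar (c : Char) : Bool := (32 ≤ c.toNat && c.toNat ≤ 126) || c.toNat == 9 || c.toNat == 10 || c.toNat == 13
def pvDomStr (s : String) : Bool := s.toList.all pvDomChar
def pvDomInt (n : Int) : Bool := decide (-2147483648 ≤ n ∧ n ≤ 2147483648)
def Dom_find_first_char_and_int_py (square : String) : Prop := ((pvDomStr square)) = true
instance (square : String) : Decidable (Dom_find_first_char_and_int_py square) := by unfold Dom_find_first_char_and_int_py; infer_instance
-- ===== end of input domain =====

-- B replaces A's single fused early-exit loop with two independent first-match scans (more idiomatic decomposition); same results and error ladder.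


-- ===== PORT A =====
-- the fused for-loop over the characters: two mutable slots, break once both are filled
def pvLoopA : List Char → Option Char → Option Char → Option Char × Option Char
  | [], fc, fi => (fc, fi)
  | c :: rest, fc, fi =>
    let fc' := if PySem.Chars.isalpha c then (if fc.isNone then some c else fc) else fc
    let fi' := if PySem.Chars.isalpha c then fi
               else if PySem.Chars.isdigit c then (if fi.isNone then some c else fi) else fi
    if fc'.isSome && fi'.isSome then (fc', fi')
    else pvLoopA rest fc' fi'

def find_first_char_and_int_py (square : String) : String :=
  let r := pvLoopA square.toList none none
  match r.1, r.2 with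
  | some fc, some fi => String.ofList [PySem.Chars.upperChar fc, fi]
  | _, _ => ""   -- Python raises ValueError here; excluded by Pre_

-- ===== PORT B =====
def find_first_char_and_int_py_alt (square : String) : String :=
  let first_char := square.toList.find? (fun c => PySem.Chars.isalpha c)
  let first_int := square.toList.find? (fun c => PySem.Chars.isdigit c)
  match first_char with
  | none => ""   -- Python raises ValueError ('no col[ or row] was identified'); excluded by Pre_
  | some fc =>
    match first_int with
    | none => ""   -- Python raises ValueError ('no row was identified'); excluded by Pre_
    | some fi => String.ofList [PySem.Chars.upperChar fc, fi]

-- ===== PRECONDITION & SPEC =====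
-- A raises ValueError when the string has no letter or no digit; Pre_ admits exactly the inputs where A returns.
def Pre_find_first_char_and_int_py (square : String) : Prop :=
  square.toList.any (fun c => PySem.Chars.isalpha c) = true ∧
  square.toList.any (fun c => PySem.Chars.isdigit c) = true
instance (square : String) : Decidable (Pre_find_first_char_and_int_py square) := by unfold Pre_find_first_char_and_int_py; infer_instance

def pvWitness_find_first_char_and_int_py : String := "a1"

def Spec_find_first_char_and_int_py (square : String) (out : String) : Prop := out = find_first_char_and_int_py_alt square
instance (square : String) (out : String) : Decidable (Spec_find_first_char_and_int_py square out) := by unfold Spec_find_first_char_and_int_py; infer_instance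

-- ===== CLAIM (what is proved, stated in full; the proofs are below) =====
def Claim_equal_find_first_char_and_int_py : Prop := ∀ (square : String), Dom_find_first_char_and_int_py square → Pre_find_first_char_and_int_py square → Spec_find_first_char_and_int_py square (find_first_char_and_int_py square)

-- ===== LEMMAS AND PROOFS =====
-- a char is never both a letter and a digit
theorem pv_alpha_not_digit (c : Char) (h : PySem.Chars.isalpha c = true) :
    PySem.Chars.isdigit c = false := by
  simp [PySem.Chars.isalpha, PySem.Chars.isdigit, PySem.Chars.isupper, PySem.Chars.islower] at *
  intro _
  rcases h with ⟨h1, _⟩ | ⟨h1, _⟩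
  · exact lt_of_lt_of_le (by decide : '9' < 'A') h1
  · exact lt_of_lt_of_le (by decide : '9' < 'a') h1

-- the fused loop computes the two independent first matches regardless of the break
theorem pvLoopA_eq (cs : List Char) : ∀ (fc fi : Option Char),
    pvLoopA cs fc fi =
      (fc.orElse (fun _ => cs.find? (fun c => PySem.Chars.isalpha c)),
       fi.orElse (fun _ => cs.find? (fun c => PySem.Chars.isdigit c))) := by
  induction cs with
  | nil => intro fc fi; cases fc <;> cases fi <;> simp [pvLoopA]
  | cons c rest ih =>
    intro fc fi
    by_cases ha : PySem.Chars.isalpha c = true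
    · have hd := pv_alpha_not_digit c ha
      cases fc <;> cases fi <;>
        simp [pvLoopA, ha, hd, ih, List.find?_cons, Option.orElse]
    · by_cases hdd : PySem.Chars.isdigit c = true
      · cases fc <;> cases fi <;>
          simp [pvLoopA, ha, hdd, ih, List.find?_cons, Option.orElse]
      · cases fc <;> cases fi <;>
          simp [pvLoopA, ha, hdd, ih, List.find?_cons, Option.orElse]

-- ===== VERDICT (by name: the statement is the Claim_ definition above) =====
theorem find_first_char_and_int_py_spec : Claim_equal_find_first_char_and_int_py := by
  intro square _ hpre
  obtain ⟨ha, hd⟩ := hpre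
  unfold Spec_find_first_char_and_int_py find_first_char_and_int_py find_first_char_and_int_py_alt
  rw [pvLoopA_eq]
  obtain ⟨fc, hfc⟩ := Option.isSome_iff_exists.mp
    (List.find?_isSome.mpr (by simpa [List.any_eq_true] using ha))
  obtain ⟨fi, hfi⟩ := Option.isSome_iff_exists.mp
    (List.find?_isSome.mpr (by simpa [List.any_eq_true] using hd))
  simp [hfc, hfi, Option.orElse]
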